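-- pv_equiv track=rewrite | github.com/joshanashakya/dissertation | workspace/dataset/java-python/GeeksForGeeks/213/A/2.py | makeSeq
-- ===== SOURCE A (Python) =====
-- def makeSeq(s, a) :
--
--     # Initialize vector to
--     # store sequence
--     seq = [];
--
--     # First add all the digits
--     # of group A from left to right
--     for i in range(len(s)) :
--         if (s[i] == 'A') :
--             seq.append(a[i]);
--
--     # Then add all the digits
--     # of group B from left to right
--     for i in range(len(s)) :
--         if (s[i] == 'B') :
--             seq.append(a[i]);
--
--     # Return the sequence
--     return seq;
-- ===== SOURCE B (Python) =====
-- def makeSeq(s, a):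
--     seqA = []
--     seqB = []
--     for i in range(len(s)):
--         ch = s[i]
--         if ch == 'A':
--             seqA.append(a[i])
--         elif ch == 'B':
--             seqB.append(a[i])
--     return seqA + seqB
-- ===== Notes on version B (the rewrite author's own statement) =====
-- stated objective: simpler
-- what changed: Replaces A's two full scans of s (one collecting 'A' positions, one collecting 'B' positions) with a single scan maintaining two accumulators that are concatenated at the end.
import Mathlib
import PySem

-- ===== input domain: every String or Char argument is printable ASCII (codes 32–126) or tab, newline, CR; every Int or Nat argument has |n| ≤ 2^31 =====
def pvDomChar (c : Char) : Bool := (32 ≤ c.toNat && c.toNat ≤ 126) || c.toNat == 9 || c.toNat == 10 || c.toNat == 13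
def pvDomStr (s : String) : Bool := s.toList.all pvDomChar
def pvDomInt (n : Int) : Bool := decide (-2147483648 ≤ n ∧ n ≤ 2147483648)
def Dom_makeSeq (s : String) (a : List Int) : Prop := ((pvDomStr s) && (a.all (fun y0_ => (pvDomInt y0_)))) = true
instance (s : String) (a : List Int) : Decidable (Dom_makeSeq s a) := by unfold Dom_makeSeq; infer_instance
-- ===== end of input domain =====

-- B is a single pass with two accumulators instead of A's two full scans; same values on all admitted inputs.

-- ===== PORT A =====
-- two full passes over range(len(s)): first collects a[i] at 'A' positions, then at 'B' positions
def makeSeq (s : String) (a : List Int) : List Int :=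
  let cs := s.toList
  let seq :=
    (PySem.List.pyRange 0 cs.length 1).foldl
      (fun seq i => if PySem.List.pyGetD cs i ' ' = 'A' then seq ++ [PySem.List.pyGetD a i 0] else seq) []
  (PySem.List.pyRange 0 cs.length 1).foldl
    (fun seq i => if PySem.List.pyGetD cs i ' ' = 'B' then seq ++ [PySem.List.pyGetD a i 0] else seq) seq

-- ===== PORT B =====
-- one pass over range(len(s)) maintaining (seqA, seqB); result is seqA ++ seqB
def makeSeq_alt (s : String) (a : List Int) : List Int :=
  let cs := s.toList
  let p :=
    (PySem.List.pyRange 0 cs.length 1).foldl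
      (fun (p : List Int × List Int) i =>
        let ch := PySem.List.pyGetD cs i ' '
        if ch = 'A' then (p.1 ++ [PySem.List.pyGetD a i 0], p.2)
        else if ch = 'B' then (p.1, p.2 ++ [PySem.List.pyGetD a i 0])
        else p)
      ([], [])
  p.1 ++ p.2

-- ===== PRECONDITION & SPEC =====
-- Pre_ excludes exactly the inputs where Python A raises IndexError: an 'A'/'B' position of s beyond len(a).
def Pre_makeSeq (s : String) (a : List Int) : Prop :=
  (s.toList.zipIdx.all (fun p => !(p.1 == 'A' || p.1 == 'B') || decide (p.2 < a.length))) = true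
instance (s : String) (a : List Int) : Decidable (Pre_makeSeq s a) := by unfold Pre_makeSeq; infer_instance
def pvWitness_makeSeq : String × List Int := ("BxA", [3, 7, 5])

def Spec_makeSeq (s : String) (a : List Int) (out : List Int) : Prop := out = makeSeq_alt s a
instance (s : String) (a : List Int) (out : List Int) : Decidable (Spec_makeSeq s a out) := by unfold Spec_makeSeq; infer_instance

-- ===== CLAIM (what is proved, stated in full; the proofs are below) =====
def Claim_equal_makeSeq : Prop := ∀ (s : String) (a : List Int), Dom_makeSeq s a → Pre_makeSeq s a → Spec_makeSeq s a (makeSeq s a)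

-- ===== LEMMAS AND PROOFS =====

-- the single pair fold of B computes A's two folds componentwise
theorem pair_fold_eq (cs : List Char) (a : List Int) (l : List Int) (xa xb : List Int) :
    l.foldl
      (fun (p : List Int × List Int) i =>
        if PySem.List.pyGetD cs i ' ' = 'A' then (p.1 ++ [PySem.List.pyGetD a i 0], p.2)
        else if PySem.List.pyGetD cs i ' ' = 'B' then (p.1, p.2 ++ [PySem.List.pyGetD a i 0])
        else p)
      (xa, xb)
    = (l.foldl (fun seq i => if PySem.List.pyGetD cs i ' ' = 'A' then seq ++ [PySem.List.pyGetD a i 0] else seq) xa,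
       l.foldl (fun seq i => if PySem.List.pyGetD cs i ' ' = 'B' then seq ++ [PySem.List.pyGetD a i 0] else seq) xb) := by
  induction l generalizing xa xb with
  | nil => rfl
  | cons i t ih =>
    simp only [List.foldl_cons]
    split_ifs with h1 h2 <;> simp_all

-- a conditional-append fold factors its initial accumulator out front
theorem foldl_ite_app (p : Int → Prop) [DecidablePred p] (f : Int → Int) (l : List Int) (acc : List Int) :
    l.foldl (fun seq i => if p i then seq ++ [f i] else seq) acc
      = acc ++ l.foldl (fun seq i => if p i then seq ++ [f i] else seq) [] := by
  induction l generalizing acc with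
  | nil => simp
  | cons i t ih =>
    simp only [List.foldl_cons]
    rw [ih]
    conv_rhs => rw [ih]
    split_ifs <;> simp

-- ===== VERDICT (by name: the statement is the Claim_ definition above) =====
theorem makeSeq_spec : Claim_equal_makeSeq := by
  intro s a _ _
  simp only [Spec_makeSeq, makeSeq, makeSeq_alt]
  rw [pair_fold_eq]
  exact foldl_ite_app (fun i => PySem.List.pyGetD s.toList i ' ' = 'B')
    (fun i => PySem.List.pyGetD a i 0) _ _
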